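-- pv_equiv track=rewrite | github.com/Albper1/D0009 | tenta1811.py | sumPart
-- ===== SOURCE A (Python) =====
-- def sumPart(l1,l2):
--     if not l1 or l1==l2:
--         return 0
--     else:
--         if l1[0] not in l2:
--             return l1[0] + sumPart(l1[1:],l2)
--         else:
--             return sumPart(l1[1:],l2)
-- ===== SOURCE B (Python) =====
-- def sumPart(l1, l2):
--     total = 0
--     for i in range(len(l1)):
--         if l1[i:] == l2:
--             break
--         if l1[i] not in l2:
--             total += l1[i]
--     return total
-- ===== Notes on version B (the rewrite author's own statement) =====
-- stated objective: simpler
-- what changed: Replaces A's slice-building recursion with a single iterative index loop carrying a running total, breaking when the remaining suffix equals l2.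
import Mathlib
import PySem

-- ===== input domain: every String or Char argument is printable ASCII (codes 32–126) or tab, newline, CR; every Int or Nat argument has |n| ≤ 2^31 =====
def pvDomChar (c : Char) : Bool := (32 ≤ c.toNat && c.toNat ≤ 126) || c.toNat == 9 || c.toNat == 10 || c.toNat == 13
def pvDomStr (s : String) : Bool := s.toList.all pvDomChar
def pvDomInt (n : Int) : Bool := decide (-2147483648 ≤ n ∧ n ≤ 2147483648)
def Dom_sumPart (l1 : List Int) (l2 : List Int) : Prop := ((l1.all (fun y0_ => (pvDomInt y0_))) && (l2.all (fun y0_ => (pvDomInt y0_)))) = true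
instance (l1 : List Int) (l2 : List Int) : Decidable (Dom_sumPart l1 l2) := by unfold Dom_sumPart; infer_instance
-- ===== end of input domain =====

-- B replaces A's slice-building recursion with an iterative index loop carrying a running total (simpler; same values).

-- ===== PORT A =====
-- literal transliteration of A's recursion: 'not l1 or l1 == l2' → 0; else recurse on the tail.
def sumPart (l1 : List Int) (l2 : List Int) : Int :=
  match l1 with
  | [] => 0
  | x :: rest =>
    if x :: rest = l2 then 0
    else if ¬ (l2.contains x) then x + sumPart rest l2
    else sumPart rest l2

-- ===== PORT B =====
-- the for-loop of Source B: index i, running total, break when l1[i:] == l2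
def sumPartAltLoop (l1 : List Int) (l2 : List Int) (i : Nat) (total : Int) : Int :=
  if h : i < l1.length then
    if l1.drop i = l2 then total
    else sumPartAltLoop l1 l2 (i + 1)
      (if ¬ (l2.contains l1[i]) then total + l1[i] else total)
  else total
termination_by l1.length - i

def sumPart_alt (l1 : List Int) (l2 : List Int) : Int := sumPartAltLoop l1 l2 0 0

-- ===== PRECONDITION & SPEC =====
def Spec_sumPart (l1 : List Int) (l2 : List Int) (out : Int) : Prop := out = sumPart_alt l1 l2
instance (l1 : List Int) (l2 : List Int) (out : Int) : Decidable (Spec_sumPart l1 l2 out) := by unfold Spec_sumPart; infer_instance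

-- ===== CLAIM (what is proved, stated in full; the proofs are below) =====
def Claim_equal_sumPart : Prop := ∀ (l1 : List Int) (l2 : List Int), Dom_sumPart l1 l2 → Spec_sumPart l1 l2 (sumPart l1 l2)

-- ===== LEMMAS AND PROOFS =====

-- loop invariant: from index i with accumulator t, the loop returns t plus A's value on the remaining suffix
theorem sumPartAltLoop_eq (l1 l2 : List Int) :
    ∀ n i t, l1.length - i = n → sumPartAltLoop l1 l2 i t = t + sumPart (l1.drop i) l2 := by
  intro n
  induction n with
  | zero =>
    intro i t h
    rw [sumPartAltLoop]
    have hi : ¬ i < l1.length := by omega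
    simp [hi, List.drop_eq_nil_of_le (by omega : l1.length ≤ i), sumPart]
  | succ n ih =>
    intro i t h
    rw [sumPartAltLoop]
    have hi : i < l1.length := by omega
    have hdrop : l1.drop i = l1[i] :: l1.drop (i + 1) := List.drop_eq_getElem_cons hi
    by_cases heq : l1.drop i = l2
    · rw [dif_pos hi, if_pos heq, hdrop, sumPart, if_pos (hdrop.symm.trans heq)]
      simp
    · rw [dif_pos hi, if_neg heq, ih (i + 1) _ (by omega), hdrop, sumPart]
      have heq' : ¬(l1[i] :: List.drop (i + 1) l1 = l2) := by rw [hdrop] at heq; exact heq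
      rw [if_neg heq']
      by_cases hc : l2.contains l1[i] = true
      · rw [if_neg (show ¬¬(l2.contains l1[i] = true) from not_not_intro hc),
          if_neg (show ¬¬(l2.contains l1[i] = true) from not_not_intro hc)]
      · rw [if_pos hc, if_pos hc]
        ring

-- ===== VERDICT (by name: the statement is the Claim_ definition above) =====
theorem sumPart_spec : Claim_equal_sumPart := by
  intro l1 l2 _
  unfold Spec_sumPart sumPart_alt
  have h := sumPartAltLoop_eq l1 l2 l1.length 0 0 rfl
  simpa using h.symm
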